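-- pv_equiv track=rewrite | github.com/CaptMavvvvv/NCC-1031-D | PRACTICE 100/multiOfThree.py | find_multiples_of_three
-- ===== SOURCE A (Python) =====
-- def find_multiples_of_three(start: int, end: int) -> list:
--     result = []
--     if start > end:
--       return result
--
--     for i in range(start, end + 1):
--       if i % 3 == 0:
--          result.append(i)
--
--     return result
-- ===== SOURCE B (Python) =====
-- def find_multiples_of_three(start: int, end: int) -> list:
--     first = start + (-start) % 3
--     return list(range(first, end + 1, 3))
-- ===== Notes on version B (the rewrite author's own statement) =====
-- stated objective: idiomatic
-- what changed: Instead of scanning every integer in [start, end] and testing i % 3 == 0, B computes the first multiple of three at or above start and emits a stride-3 range, visiting only the multiples with no per-element test and no start > end guard.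
import Mathlib
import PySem

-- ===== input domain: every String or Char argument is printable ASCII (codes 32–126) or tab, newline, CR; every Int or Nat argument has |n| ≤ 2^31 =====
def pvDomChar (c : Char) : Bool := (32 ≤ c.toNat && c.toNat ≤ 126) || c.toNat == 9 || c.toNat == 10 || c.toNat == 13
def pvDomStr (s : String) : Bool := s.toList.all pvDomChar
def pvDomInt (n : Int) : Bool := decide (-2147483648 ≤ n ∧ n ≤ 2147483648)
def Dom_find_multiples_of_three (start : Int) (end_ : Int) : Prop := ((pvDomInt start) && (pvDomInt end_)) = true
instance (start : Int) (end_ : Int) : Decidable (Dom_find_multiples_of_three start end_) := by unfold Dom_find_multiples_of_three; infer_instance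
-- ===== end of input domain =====

-- B replaces A's full scan with a per-element `% 3` test by a stride-3 range starting at
-- the first multiple of three ≥ start (objective: idiomatic; no per-element branch).

-- ===== PORT A =====
def find_multiples_of_three (start : Int) (end_ : Int) : List Int :=
  let result : List Int := []
  if start > end_ then result
  else
    (PySem.List.pyRange start (end_ + 1) 1).foldl
      (fun result i => if PySem.Int.mod i 3 == 0 then result ++ [i] else result) result

-- ===== PORT B =====
def find_multiples_of_three_alt (start : Int) (end_ : Int) : List Int :=
  let first := start + PySem.Int.mod (-start) 3
  PySem.List.pyRange first (end_ + 1) 3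

-- ===== PRECONDITION & SPEC =====
def Spec_find_multiples_of_three (start : Int) (end_ : Int) (out : List Int) : Prop := out = find_multiples_of_three_alt start end_
instance (start : Int) (end_ : Int) (out : List Int) : Decidable (Spec_find_multiples_of_three start end_ out) := by unfold Spec_find_multiples_of_three; infer_instance

-- ===== CLAIM (what is proved, stated in full; the proofs are below) =====
def Claim_equal_find_multiples_of_three : Prop := ∀ (start : Int) (end_ : Int), Dom_find_multiples_of_three start end_ → Spec_find_multiples_of_three start end_ (find_multiples_of_three start end_)

-- ===== LEMMAS AND PROOFS =====

-- Python `x % 3` is Lean's emod for the positive divisor 3.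
theorem pymod3 (x : Int) : PySem.Int.mod x 3 = x % 3 := by
  simp [PySem.Int.mod, Int.fmod_eq_emod]

theorem pyRange3_nil (a b : Int) (h : b ≤ a) : PySem.List.pyRange a b 3 = [] := by
  rw [PySem.List.pyRange_of_pos a b (by norm_num)]
  simp [Int.not_lt.mpr h]

theorem pyRange3_cons (a b : Int) (h : a < b) :
    PySem.List.pyRange a b 3 = a :: PySem.List.pyRange (a + 3) b 3 := by
  rw [PySem.List.pyRange_of_pos a b (by norm_num),
      PySem.List.pyRange_of_pos (a + 3) b (by norm_num)]
  rw [if_pos h]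
  have hcount : ((b - a + 3 - 1) / 3).toNat
      = (if a + 3 < b then ((b - (a + 3) + 3 - 1) / 3).toNat else 0) + 1 := by
    split_ifs with h' <;> omega
  rw [hcount, List.range_succ_eq_map, List.map_cons, List.map_map]
  congr 1
  · norm_num
  · apply List.map_congr_left
    intro k _
    simp [Nat.succ_eq_add_one]
    ring

-- The multiples of 3 inside range(a, b) are exactly range(first multiple ≥ a, b, 3).
theorem filter_mod3_eq_range3 (b : Int) : ∀ (n : Nat) (a : Int), (b - a).toNat = n →
    (PySem.List.pyRange a b 1).filter (fun i => PySem.Int.mod i 3 == 0)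
      = PySem.List.pyRange (a + PySem.Int.mod (-a) 3) b 3 := by
  intro n
  induction n with
  | zero =>
      intro a hn
      have hba : b ≤ a := by omega
      rw [PySem.List.pyRange_one_eq_nil hba, List.filter_nil, pyRange3_nil]
      rw [pymod3]
      omega
  | succ m ih =>
      intro a hn
      have hab : a < b := by omega
      rw [PySem.List.pyRange_one_cons hab, List.filter_cons,
          ih (a + 1) (by omega)]
      by_cases hr : a % 3 = 0
      · have hc : (PySem.Int.mod a 3 == 0) = true := by rw [pymod3]; simp [hr]
        rw [hc]
        simp only [if_true]
        have h1 : a + 1 + PySem.Int.mod (-(a + 1)) 3 = a + 3 := by rw [pymod3]; omega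
        have h2 : a + PySem.Int.mod (-a) 3 = a := by rw [pymod3]; omega
        rw [h1, h2, pyRange3_cons a b hab]
      · have hc : (PySem.Int.mod a 3 == 0) = false := by
          rw [pymod3]; simpa using hr
        rw [hc]
        simp only [Bool.false_eq_true, if_false]
        have h1 : a + 1 + PySem.Int.mod (-(a + 1)) 3 = a + PySem.Int.mod (-a) 3 := by
          rw [pymod3, pymod3]; omega
        rw [h1]

-- ===== VERDICT (by name: the statement is the Claim_ definition above) =====
theorem find_multiples_of_three_spec : Claim_equal_find_multiples_of_three := by
  intro start end_ _
  unfold Spec_find_multiples_of_three find_multiples_of_three find_multiples_of_three_alt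
  simp only []
  split_ifs with h
  · rw [pyRange3_nil]
    rw [pymod3]
    omega
  · rw [PySem.List.foldl_append_if_eq_filter, List.nil_append,
        filter_mod3_eq_range3 (end_ + 1) (end_ + 1 - start).toNat start rfl]
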